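-- pv_equiv track=rewrite | github.com/badochov/dls-pi | python/solo/display_only2.py | to_strrr
-- ===== SOURCE A (Python) =====
-- def to_strrr(centiseconds):
--     final = ""
--     centiseconds = str(centiseconds)
--     centiseconds = centiseconds[::-1]
--     if len(centiseconds) == 1:
--         centiseconds+="0"
--     if len(centiseconds) == 2:
--         centiseconds+="0"
--     for x in enumerate(centiseconds):
--         if x[0] == 2:
--             final+="."
--         if x[0] == 4:
--             final+=":"
--         final+=x[1]
--     return final[::-1]
-- ===== SOURCE B (Python) =====
-- def to_strrr(centiseconds):
--     s = str(centiseconds)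
--     if len(s) < 3:
--         s = "0" * (3 - len(s)) + s
--     if len(s) >= 5:
--         return s[:-4] + ":" + s[-4:-2] + "." + s[-2:]
--     return s[:-2] + "." + s[-2:]
-- ===== Notes on version B (the rewrite author's own statement) =====
-- stated objective: simpler
-- what changed: B left-pads str(n) to length 3 and builds the result by direct positional slicing (s[:-4]+':'+s[-4:-2]+'.'+s[-2:] or s[:-2]+'.'+s[-2:]), replacing A's reverse, character-by-character enumerate loop with index tests, and second reverse.
import Mathlib
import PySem

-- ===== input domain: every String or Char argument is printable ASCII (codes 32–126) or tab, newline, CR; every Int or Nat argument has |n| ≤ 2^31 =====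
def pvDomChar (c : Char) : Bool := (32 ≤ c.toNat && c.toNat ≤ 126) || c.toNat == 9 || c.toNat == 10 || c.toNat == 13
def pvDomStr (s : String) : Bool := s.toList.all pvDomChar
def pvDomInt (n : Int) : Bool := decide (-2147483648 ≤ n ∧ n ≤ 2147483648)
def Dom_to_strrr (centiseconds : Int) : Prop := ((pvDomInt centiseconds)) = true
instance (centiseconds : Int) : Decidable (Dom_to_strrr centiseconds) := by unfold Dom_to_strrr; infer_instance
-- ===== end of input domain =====

-- B formats the centisecond count by left-padding str(n) to length 3 and slicing the digits
-- positionally, instead of A's reverse / char-by-char enumerate loop / reverse; objective: simpler.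

-- ===== PORT A =====
-- A's loop body (the body of 'for x in enumerate(centiseconds)'), named so the lemmas can cite it.
def pvBody (acc : List Char) (x : Int × Char) : List Char :=
  let acc := if x.1 == 2 then acc ++ ['.'] else acc                 -- if x[0] == 2: final += "."
  let acc := if x.1 == 4 then acc ++ [':'] else acc                 -- if x[0] == 4: final += ":"
  acc ++ [x.2]                                                      -- final += x[1]

def to_strrr (centiseconds : Int) : String :=
  let final : List Char := []                                       -- final = ""
  let cs : List Char := PySem.Int.toChars centiseconds              -- centiseconds = str(centiseconds)
  let cs : List Char := (PySem.List.slice? cs none none (-1)).getD []   -- centiseconds = centiseconds[::-1]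
  let cs : List Char := if cs.length == 1 then cs ++ ['0'] else cs
  let cs : List Char := if cs.length == 2 then cs ++ ['0'] else cs
  let final : List Char := (PySem.List.enumerate cs).foldl pvBody final -- for x in enumerate(...)
  String.ofList ((PySem.List.slice? final none none (-1)).getD [])      -- return final[::-1]

-- ===== PORT B =====
def to_strrr_alt (centiseconds : Int) : String :=
  let s : List Char := PySem.Int.toChars centiseconds               -- s = str(centiseconds)
  let s : List Char :=
    if s.length < 3 then List.replicate (3 - s.length) '0' ++ s else s  -- s = "0"*(3-len(s)) + s
  if 5 ≤ s.length then
    String.ofList (PySem.List.slice s none (some (-4)) ++ [':'] ++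
      PySem.List.slice s (some (-4)) (some (-2)) ++ ['.'] ++
      PySem.List.slice s (some (-2)) none)                          -- s[:-4]+":"+s[-4:-2]+"."+s[-2:]
  else
    String.ofList (PySem.List.slice s none (some (-2))  ++ ['.'] ++
      PySem.List.slice s (some (-2)) none)                          -- s[:-2]+"."+s[-2:]

-- ===== PRECONDITION & SPEC =====
def Spec_to_strrr (centiseconds : Int) (out : String) : Prop := out = to_strrr_alt centiseconds
instance (centiseconds : Int) (out : String) : Decidable (Spec_to_strrr centiseconds out) := by unfold Spec_to_strrr; infer_instance

-- ===== CLAIM (what is proved, stated in full; the proofs are below) =====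
def Claim_equal_to_strrr : Prop := ∀ (centiseconds : Int), Dom_to_strrr centiseconds → Spec_to_strrr centiseconds (to_strrr centiseconds)

-- ===== LEMMAS AND PROOFS =====

-- str(n) is never empty.
theorem pv_toChars_ne_nil (n : Int) : PySem.Int.toChars n ≠ [] := by
  unfold PySem.Int.toChars
  split
  · simp
  · have := @Nat.length_toDigits_pos 10 n.toNat
    intro h
    simp [h] at this

-- Past index 4 A's loop only appends the character.
theorem pv_fold_high (u : List Char) : ∀ (s : Int) (acc : List Char), 5 ≤ s →
    (PySem.List.enumerate u s).foldl pvBody acc = acc ++ u := by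
  induction u with
  | nil => intro s acc _; simp [PySem.List.enumerate_nil]
  | cons a u ih =>
    intro s acc hs
    rw [PySem.List.enumerate_cons, List.foldl_cons]
    have h2 : (s == (2 : Int)) = false := by simp; omega
    have h4 : (s == (4 : Int)) = false := by simp; omega
    rw [show pvBody acc (s, a) = acc ++ [a] by simp [pvBody, h2, h4]]
    rw [ih (s + 1) _ (by omega)]
    simp

-- The heart of the equivalence: over the reversed padded digit string x :: y :: z :: rest
-- (length ≥ 3, so no padding happens on either side), A's enumerate loop (then reversed)
-- equals B's positional slicing of the forward string.
theorem pv_core (x y z : Char) (rest : List Char) :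
    String.ofList (((PySem.List.enumerate (x :: y :: z :: rest)).foldl pvBody []).reverse) =
    (if 5 ≤ (x :: y :: z :: rest).reverse.length then
      String.ofList (PySem.List.slice (x :: y :: z :: rest).reverse none (some (-4)) ++ [':'] ++
        PySem.List.slice (x :: y :: z :: rest).reverse (some (-4)) (some (-2)) ++ ['.'] ++
        PySem.List.slice (x :: y :: z :: rest).reverse (some (-2)) none)
    else
      String.ofList (PySem.List.slice (x :: y :: z :: rest).reverse none (some (-2)) ++ ['.'] ++
        PySem.List.slice (x :: y :: z :: rest).reverse (some (-2)) none)) := by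
  match rest with
  | [] =>
    simp [PySem.List.enumerate_cons, PySem.List.enumerate_nil, pvBody,
      PySem.List.slice, PySem.List.clampIdx]
  | [d] =>
    simp [PySem.List.enumerate_cons, PySem.List.enumerate_nil, pvBody,
      PySem.List.slice, PySem.List.clampIdx]
  | d :: e :: rest2 =>
    rw [PySem.List.enumerate_cons, PySem.List.enumerate_cons, PySem.List.enumerate_cons,
      PySem.List.enumerate_cons, PySem.List.enumerate_cons]
    rw [List.foldl_cons, List.foldl_cons, List.foldl_cons, List.foldl_cons, List.foldl_cons]
    simp only [show (0 : Int) + 1 = 1 from by norm_num, show (1 : Int) + 1 = 2 from by norm_num,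
      show (2 : Int) + 1 = 3 from by norm_num, show (3 : Int) + 1 = 4 from by norm_num,
      show (4 : Int) + 1 = 5 from by norm_num]
    rw [pv_fold_high rest2 5 _ (by norm_num)]
    have hacc : pvBody (pvBody (pvBody (pvBody (pvBody [] (0, x)) (1, y)) (2, z)) (3, d)) (4, e)
        = [x, y, '.', z, d, ':', e] := by simp [pvBody]
    rw [hacc]
    have hs : (x :: y :: z :: d :: e :: rest2).reverse =
        rest2.reverse ++ [e, d, z, y, x] := by simp
    rw [hs]
    have hlen : (rest2.reverse ++ ([e, d, z, y, x] : List Char)).length = rest2.length + 5 := by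
      simp
    rw [if_pos (show (5 : Nat) ≤ (rest2.reverse ++ ([e, d, z, y, x] : List Char)).length by simp)]
    have h1 : PySem.List.slice (rest2.reverse ++ [e, d, z, y, x]) none (some (-4)) =
        rest2.reverse ++ [e] := by
      rw [PySem.List.slice_to_neg_ofNat _ 4 (by omega), hlen]
      rw [List.take_append]
      simp
    have hc4 : PySem.List.clampIdx (rest2.reverse ++ ([e, d, z, y, x] : List Char)).length (-4) =
        rest2.length + 1 := by
      unfold PySem.List.clampIdx
      rw [if_pos (show (-4 : Int) < 0 by norm_num), if_neg (by simp; omega)]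
      simp; omega
    have hc2 : PySem.List.clampIdx (rest2.reverse ++ ([e, d, z, y, x] : List Char)).length (-2) =
        rest2.length + 3 := by
      unfold PySem.List.clampIdx
      rw [if_pos (show (-2 : Int) < 0 by norm_num), if_neg (by simp; omega)]
      simp; omega
    have h2 : PySem.List.slice (rest2.reverse ++ [e, d, z, y, x]) (some (-4)) (some (-2)) =
        [d, z] := by
      rw [show PySem.List.slice (rest2.reverse ++ ([e, d, z, y, x] : List Char)) (some (-4)) (some (-2)) =
        List.take (PySem.List.clampIdx (rest2.reverse ++ ([e, d, z, y, x] : List Char)).length (-2) -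
            PySem.List.clampIdx (rest2.reverse ++ ([e, d, z, y, x] : List Char)).length (-4))
          (List.drop (PySem.List.clampIdx (rest2.reverse ++ ([e, d, z, y, x] : List Char)).length (-4))
            (rest2.reverse ++ [e, d, z, y, x])) from rfl]
      rw [hc4, hc2]
      rw [show rest2.length + 3 - (rest2.length + 1) = 2 from by omega]
      rw [List.drop_append]
      rw [List.drop_of_length_le (by simp : rest2.reverse.length ≤ rest2.length + 1)]
      simp
    have h3 : PySem.List.slice (rest2.reverse ++ [e, d, z, y, x]) (some (-2)) none =
        [y, x] := by
      rw [PySem.List.slice_from_neg_ofNat _ 2 (by omega), hlen]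
      rw [show rest2.length + 5 - 2 = rest2.length + 3 from by omega]
      rw [List.drop_append]
      rw [List.drop_of_length_le (by simp : rest2.reverse.length ≤ rest2.length + 3)]
      simp
    rw [h1, h2, h3]
    simp

-- ===== VERDICT (by name: the statement is the Claim_ definition above) =====
theorem to_strrr_spec : Claim_equal_to_strrr := by
  intro n _
  unfold Spec_to_strrr
  simp only [to_strrr, to_strrr_alt, PySem.List.slice?_none_none_neg_one, Option.getD_some]
  have hne : PySem.Int.toChars n ≠ [] := pv_toChars_ne_nil n
  generalize h : PySem.Int.toChars n = l
  rw [h] at hne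
  clear h
  match l, hne with
  | [a], _ =>
    simp [PySem.List.enumerate_cons, PySem.List.enumerate_nil, pvBody,
      PySem.List.slice, PySem.List.clampIdx]
  | [a, b], _ =>
    simp [PySem.List.enumerate_cons, PySem.List.enumerate_nil, pvBody,
      PySem.List.slice, PySem.List.clampIdx]
  | a :: b :: c :: t, _ =>
    have h3 : 3 ≤ (a :: b :: c :: t).reverse.length := by simp
    rcases hr : (a :: b :: c :: t).reverse with _ | ⟨x, _ | ⟨y, _ | ⟨z, rest⟩⟩⟩
    · rw [hr] at h3; simp at h3
    · rw [hr] at h3; simp at h3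
    · rw [hr] at h3; simp at h3
    · have hl : (a :: b :: c :: t) = (x :: y :: z :: rest).reverse := by
        rw [← hr, List.reverse_reverse]
      have c1 : ((x :: y :: z :: rest).length == 1) = false := by simp
      have c2 : ((x :: y :: z :: rest).length == 2) = false := by simp
      simp only [c1, c2, Bool.false_eq_true, if_false]
      have hnopad : ¬ (a :: b :: c :: t).length < 3 := by simp
      rw [if_neg hnopad]
      rw [hl]
      exact pv_core x y z rest
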